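-- pv_equiv track=rewrite | github.com/Jeeyeonn/Algorithm | codingtest_basic/프로그래머스_이진변환반복하기_220910.py | solution
-- ===== SOURCE A (Python) =====
-- def solution(s):
--     zero_sum = 0
--     two_sum = 0
--
--     while len(s) != 1:
--         zero_num = 0
--         for i in s:
--             if i == "0":
--                 zero_num += 1
--         zero_sum += zero_num
--         n = len(s) - zero_num
--         two = []
--         while True:
--             if n == 0:
--                 two_sum += 1
--                 break
--             two.append(str(n%2))
--             n = n//2
--
--
--         two.sort(reverse=True)
--         s = ''.join(two)
--
--     answer = []
--     answer.append(two_sum)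
--     answer.append(zero_sum)
--     return answer
-- ===== SOURCE B (Python) =====
-- def solution(s):
--     # Recurse on the integer whose binary digits the current string holds:
--     # each string state after the first step is (a permutation of) bin(o),
--     # so its length is o.bit_length() and its 1-count is o.bit_count().
--     # The answer pair is composed on the way back from the recursion.
--     def chain(o):
--         b = o.bit_length()
--         if b == 1:
--             return (0, 0)
--         p = o.bit_count()
--         c, r = chain(p)
--         return (c + 1, r + b - p)
--
--     n = len(s)
--     if n == 1:
--         return [0, 0]
--     ones = n - s.count('0')
--     c, r = chain(ones)
--     return [c + 1, r + n - ones]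
-- ===== Notes on version B (the rewrite author's own statement) =====
-- stated objective: faster
-- what changed: B returns early for length-1 input and then recurses on the single integer whose binary digits each subsequent string would hold (chain o -> popcount o), composing the [count, removed] pair on the way back; A's string state, per-character scan, hand-rolled base-2 digit list, sort and accumulators all disappear.
import Mathlib
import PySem

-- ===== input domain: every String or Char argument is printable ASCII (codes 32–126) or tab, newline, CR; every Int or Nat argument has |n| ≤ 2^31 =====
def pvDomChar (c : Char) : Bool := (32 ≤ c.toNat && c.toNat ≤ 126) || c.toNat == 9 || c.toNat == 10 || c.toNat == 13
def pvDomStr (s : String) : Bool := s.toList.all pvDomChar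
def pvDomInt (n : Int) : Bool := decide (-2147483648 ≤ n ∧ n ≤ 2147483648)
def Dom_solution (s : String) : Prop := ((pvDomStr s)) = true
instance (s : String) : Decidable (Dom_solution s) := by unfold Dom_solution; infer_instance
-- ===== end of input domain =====

-- B returns early for length-1 input and then recurses on the single integer whose
-- binary digits the next string would hold, composing [count, removed] on return;
-- A's string state, per-character scan, base-2 digit list, sort and accumulators go away.

-- ===== PORT A =====
-- 'for i in s: if i == "0": zero_num += 1'
def pvZeroNum : List Char → Nat → Nat
  | [], acc => acc
  | c :: rest, acc => pvZeroNum rest (if c = '0' then acc + 1 else acc)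

-- inner 'while True: … two.append(str(n%2)); n = n//2' (the 'n == 0' break adds 1 to
-- two_sum, done at the call site — it happens exactly once per call)
def pvTwo (n : Nat) (two : List String) : List String :=
  if n = 0 then two else pvTwo (n / 2) (two ++ [PySem.Int.toStr ((n % 2 : Nat) : Int)])
decreasing_by exact Nat.div_lt_self (Nat.pos_of_ne_zero (by assumption)) one_lt_two

-- outer 'while len(s) != 1' loop; state s kept as List Char. The fuel argument only
-- makes the recursion total: whenever the Python returns it is never exhausted (on
-- all-'0' strings of length ≠ 1 the Python loops forever and fuel runs out instead).
def pvLoopA (fuel : Nat) (s : List Char) (zero_sum two_sum : Nat) : List Int :=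
  match fuel with
  | 0 => [(two_sum : Int), (zero_sum : Int)]
  | fuel + 1 =>
    if s.length = 1 then [(two_sum : Int), (zero_sum : Int)]
    else
      let zero_num := pvZeroNum s 0
      let zero_sum' := zero_sum + zero_num
      let n := s.length - zero_num
      let two := pvTwo n []
      -- 'two.sort(reverse=True)' then "''.join(two)"
      let twoSorted := PySem.List.sorted two (fun x => x) true
      let s' := PySem.Chars.join [] (twoSorted.map String.toList)
      pvLoopA fuel s' zero_sum' (two_sum + 1)

def solution (s : String) : List Int := pvLoopA (s.toList.length + 64) s.toList 0 0

-- ===== PORT B =====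
-- 'def chain(o): b = o.bit_length(); if b == 1: return (0,0); p = o.bit_count();
--  c, r = chain(p); return (c+1, r+b-p)' — fuel is only a totality guard: whenever
-- the Python B returns, its recursion is never deeper than the fuel.
def pvChain (fuel : Nat) (o : Nat) : Nat × Nat :=
  match fuel with
  | 0 => (0, 0)
  | fuel + 1 =>
    let b := (PySem.Int.bitLength (o : Int))
    if b = 1 then (0, 0)
    else
      let p := (PySem.Int.bitCount (o : Int))
      let cr := pvChain fuel p
      (cr.1 + 1, cr.2 + (b - p))

def solution_alt (s : String) : List Int :=
  let n := s.toList.length                       -- len(s)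
  if n = 1 then [0, 0]
  else
    let ones := n - PySem.Str.count s "0"
    let cr := pvChain (n + 63) ones
    [((cr.1 + 1 : Nat) : Int), ((cr.2 + (n - ones) : Nat) : Int)]

-- ===== PRECONDITION & SPEC =====
-- (On strings of length ≠ 1 consisting only of '0' — including "" — Python A loops
-- forever and Python B's recursion overflows; with the fuels offset by the peeled
-- first step the two ports still agree everywhere, so no Pre_ is needed.)
def Spec_solution (s : String) (out : List Int) : Prop := out = solution_alt s
instance (s : String) (out : List Int) : Decidable (Spec_solution s out) := by unfold Spec_solution; infer_instance

-- ===== CLAIM (what is proved, stated in full; the proofs are below) =====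
def Claim_equal_solution : Prop := ∀ (s : String), Dom_solution s → Spec_solution s (solution s)

-- ===== LEMMAS AND PROOFS =====

-- accumulator lemma for A's zero-counting loop
theorem pvZeroNum_eq (l : List Char) : ∀ acc : Nat, pvZeroNum l acc = acc + l.count '0' := by
  induction l with
  | nil => intro acc; simp [pvZeroNum]
  | cons c t ih =>
    intro acc
    by_cases h : c = '0' <;> (simp [pvZeroNum, h, ih]; try omega)

theorem toStr0 : PySem.Int.toStr (0 : Int) = "0" := by decide
theorem toStr1 : PySem.Int.toStr (1 : Int) = "1" := by decide
theorem toList0 : "0".toList = ['0'] := by decide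
theorem toList1 : "1".toList = ['1'] := by decide

-- accumulator lemma for A's digit-building loop
theorem pvTwo_acc (n : Nat) : ∀ two : List String, pvTwo n two = two ++ pvTwo n [] := by
  induction n using Nat.strong_induction_on with
  | _ n ih =>
    intro two
    by_cases h : n = 0
    · simp [h, pvTwo]
    · conv_lhs => rw [pvTwo]
      conv_rhs => rw [pvTwo]
      rw [if_neg h, if_neg h,
        ih (n / 2) (Nat.div_lt_self (Nat.pos_of_ne_zero h) one_lt_two),
        ih (n / 2) (Nat.div_lt_self (Nat.pos_of_ne_zero h) one_lt_two) ([] ++ [PySem.Int.toStr ((n % 2 : Nat) : Int)])]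
      simp

-- head-first view of the digit list
theorem pvTwo_cons (n : Nat) (h : n ≠ 0) :
    pvTwo n [] = PySem.Int.toStr ((n % 2 : Nat) : Int) :: pvTwo (n / 2) [] := by
  conv_lhs => rw [pvTwo]
  rw [if_neg h, pvTwo_acc]
  simp

-- the flattened digit list has length bit_length n …
theorem pvTwo_flatten_length (n : Nat) :
    ((pvTwo n []).map String.toList).flatten.length = PySem.Int.bitLength (n : Int) := by
  induction n using Nat.strong_induction_on with
  | _ n ih =>
    by_cases h : n = 0
    · simp [h, pvTwo, PySem.Int.bitLength_zero]
    · rw [pvTwo_cons n h,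
        PySem.Int.bitLength_natCast (Nat.pos_of_ne_zero h),
        ← ih (n / 2) (Nat.div_lt_self (Nat.pos_of_ne_zero h) one_lt_two)]
      rcases Nat.mod_two_eq_zero_or_one n with h2 | h2 <;>
        simp [h2, toStr0, toStr1, toList0, toList1]

-- … and its counts of '0' and '1' add up to popcount/bit_length
theorem pvTwo_flatten_count (n : Nat) :
    ((pvTwo n []).map String.toList).flatten.count '1' = PySem.Int.bitCount (n : Int) ∧
    ((pvTwo n []).map String.toList).flatten.count '0' + PySem.Int.bitCount (n : Int)
      = PySem.Int.bitLength (n : Int) := by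
  induction n using Nat.strong_induction_on with
  | _ n ih =>
    by_cases h : n = 0
    · simp [h, pvTwo, PySem.Int.bitCount_zero, PySem.Int.bitLength_zero]
    · have hlt := Nat.div_lt_self (Nat.pos_of_ne_zero h) one_lt_two
      obtain ⟨ih1, ih2⟩ := ih (n / 2) hlt
      rw [pvTwo_cons n h,
        PySem.Int.bitCount_natCast (Nat.pos_of_ne_zero h),
        PySem.Int.bitLength_natCast (Nat.pos_of_ne_zero h)]
      rcases Nat.mod_two_eq_zero_or_one n with h2 | h2 <;>
        (simp [h2, toStr0, toStr1, toList0, toList1, ih1]) <;>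
        (push_cast at ih1 ih2 ⊢; omega)

-- helper: join with empty separator is flatten
theorem join_nil_eq_flatten (xss : List (List Char)) : PySem.Chars.join [] xss = xss.flatten := by
  induction xss with
  | nil => rfl
  | cons x t ih =>
    cases t with
    | nil => simp [PySem.Chars.join_singleton]
    | cons y u => rw [PySem.Chars.join_cons_cons] at *; simp [ih]

-- the rebuilt string s' is a permutation of the flattened digits, so length/counts carry over
theorem sJoin_perm (n : Nat) :
    (PySem.Chars.join [] ((PySem.List.sorted (pvTwo n []) (fun x => x) true).map String.toList)).Perm
      ((pvTwo n []).map String.toList).flatten := by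
  rw [join_nil_eq_flatten]
  exact (List.Perm.map String.toList (PySem.List.sorted_perm _ _ _)).flatten

-- key per-step facts about A's rebuilt string, stated via bitLength/bitCount
theorem sJoin_length (n : Nat) :
    (PySem.Chars.join [] ((PySem.List.sorted (pvTwo n []) (fun x => x) true).map String.toList)).length
      = PySem.Int.bitLength (n : Int) := by
  rw [(sJoin_perm n).length_eq, pvTwo_flatten_length]

theorem sJoin_count0 (n : Nat) :
    (PySem.Chars.join [] ((PySem.List.sorted (pvTwo n []) (fun x => x) true).map String.toList)).count '0'
      + PySem.Int.bitCount (n : Int) = PySem.Int.bitLength (n : Int) := by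
  rw [(sJoin_perm n).count_eq, (pvTwo_flatten_count n).2]

-- MAIN BRIDGE: one unfolding of A's loop against B's return-composed chain; the two
-- fuels are offset by exactly the peeled first iteration, so truncation also aligns.
theorem loop_eq_chain (f : Nat) : ∀ (s : List Char) (zs ts : Nat), s.length ≠ 1 →
    pvLoopA (f + 1) s zs ts =
      [((ts + 1 + (pvChain f (s.length - s.count '0')).1 : Nat) : Int),
       ((zs + s.count '0' + (pvChain f (s.length - s.count '0')).2 : Nat) : Int)] := by
  induction f with
  | zero =>
    intro s zs ts h1
    rw [pvLoopA, if_neg h1]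
    have hzn : pvZeroNum s 0 = s.count '0' := by rw [pvZeroNum_eq]; omega
    simp [pvLoopA, pvChain, hzn]
  | succ f ih =>
    intro s zs ts h1
    rw [pvLoopA, if_neg h1]
    have hzn : pvZeroNum s 0 = s.count '0' := by rw [pvZeroNum_eq]; omega
    simp only [hzn]
    set o := s.length - s.count '0' with ho
    set s' := PySem.Chars.join []
      ((PySem.List.sorted (pvTwo o []) (fun x => x) true).map String.toList) with hs'
    have hlen : s'.length = PySem.Int.bitLength (o : Int) := sJoin_length o
    have hcnt : s'.count '0' + PySem.Int.bitCount (o : Int) = PySem.Int.bitLength (o : Int) :=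
      sJoin_count0 o
    by_cases hb : PySem.Int.bitLength (o : Int) = 1
    · -- next string has length 1: both stop
      rw [pvLoopA, if_pos (by rw [hlen, hb])]
      conv_rhs => rw [pvChain]
      rw [if_pos hb]
      simp
    · -- continue: s'.length ≠ 1, apply IH to s'
      have hl1 : s'.length ≠ 1 := by rw [hlen]; exact hb
      rw [ih s' (zs + s.count '0') (ts + 1) hl1]
      have hones : s'.length - s'.count '0' = PySem.Int.bitCount (o : Int) := by omega
      conv_rhs => rw [pvChain]
      rw [if_neg hb]
      simp only [hones, List.cons.injEq, and_true]
      refine ⟨?_, ?_⟩ <;> (push_cast; omega)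

-- 'str.count' with a one-character needle is the character count
theorem count_go_single (c : Char) : ∀ (fuel : Nat) (l : List Char) (acc : Nat), l.length ≤ fuel →
    PySem.Chars.count.go [c] fuel l acc = acc + l.count c := by
  intro fuel
  induction fuel with
  | zero =>
    intro l acc h
    interval_cases hl : l.length
    · simp_all [PySem.Chars.count.go, List.length_eq_zero_iff.1 hl]
  | succ fuel ih =>
    intro l acc h
    cases l with
    | nil => simp [PySem.Chars.count.go]
    | cons c' t =>
      rw [PySem.Chars.count.go]
      by_cases hc : c = c'
      · subst hc
        rw [if_pos (by simp [List.isPrefixOf])]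
        simp only [List.length_singleton, List.drop_one, List.tail_cons]
        rw [ih t (acc + 1) (by simpa using h)]
        simp
        omega
      · rw [if_neg (by simp [List.isPrefixOf, hc])]
        rw [ih t acc (by simpa using h)]
        simp [Ne.symm hc]

theorem chars_count_single (s : List Char) (c : Char) : PySem.Chars.count s [c] = s.count c := by
  rw [PySem.Chars.count]
  simp [count_go_single c s.length s 0 le_rfl]

-- ===== VERDICT (by name: the statement is the Claim_ definition above) =====
theorem solution_spec : Claim_equal_solution := by
  intro s _
  unfold Spec_solution solution solution_alt
  by_cases h1 : s.toList.length = 1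
  · simp [h1, pvLoopA]
  · rw [if_neg h1]
    have hf : s.toList.length + 64 = (s.toList.length + 63) + 1 := by omega
    rw [hf, loop_eq_chain (s.toList.length + 63) s.toList 0 0 h1]
    have hc : PySem.Str.count s "0" = s.toList.count '0' := by
      rw [PySem.Str.count_eq, toList0, chars_count_single]
    have hle : s.toList.count '0' ≤ s.toList.length := List.count_le_length
    rw [hc]
    have h2 : s.toList.length - (s.toList.length - s.toList.count '0') = s.toList.count '0' := by
      omega
    simp only [h2, List.cons.injEq, and_true]
    constructor <;> (push_cast; omega)
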